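-- pv_equiv track=rewrite | github.com/roseane30pontes/PythonExerciciosBack | 2ºDesafioPessoal.py | retorna_menor_e_maior_valor_de_vendas
-- ===== SOURCE A (Python) =====
-- def retorna_menor_e_maior_valor_de_vendas(ticket):
--     lista = ticket
--     novalista = []
--     for i in lista:
--         quantidadevendas = len(i)
--         listaordem = sorted(i)
--         menorvalor = 0
--         maiorvalor = 0
--
--         for item in listaordem:
--             if (item >= 20 and menorvalor == 0):
--                 menorvalor = item
--
--             if (item >= 20 and item <= 500 and item > maiorvalor):
--                 maiorvalor = item
--
--         if (menorvalor == 0 and maiorvalor == 0):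
--             minilista = []
--         else:
--             minilista = [menorvalor, maiorvalor]
--
--         novalista.append(minilista)
--
--     return novalista
-- ===== SOURCE B (Python) =====
-- def retorna_menor_e_maior_valor_de_vendas(ticket):
--     out = []
--     for i in ticket:
--         ge = [x for x in i if x >= 20]
--         if not ge:
--             out.append([])
--         else:
--             inr = [x for x in ge if x <= 500]
--             out.append([min(ge), max(inr) if inr else 0])
--     return out
-- ===== Notes on version B (the rewrite author's own statement) =====
-- stated objective: simpler
-- what changed: B drops the sort and the stateful sentinel scan entirely: per sublist it filters once for values >= 20 and takes min/max of the filtered lists, instead of sorting and folding two sentinel accumulators over the sorted list.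
import Mathlib
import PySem

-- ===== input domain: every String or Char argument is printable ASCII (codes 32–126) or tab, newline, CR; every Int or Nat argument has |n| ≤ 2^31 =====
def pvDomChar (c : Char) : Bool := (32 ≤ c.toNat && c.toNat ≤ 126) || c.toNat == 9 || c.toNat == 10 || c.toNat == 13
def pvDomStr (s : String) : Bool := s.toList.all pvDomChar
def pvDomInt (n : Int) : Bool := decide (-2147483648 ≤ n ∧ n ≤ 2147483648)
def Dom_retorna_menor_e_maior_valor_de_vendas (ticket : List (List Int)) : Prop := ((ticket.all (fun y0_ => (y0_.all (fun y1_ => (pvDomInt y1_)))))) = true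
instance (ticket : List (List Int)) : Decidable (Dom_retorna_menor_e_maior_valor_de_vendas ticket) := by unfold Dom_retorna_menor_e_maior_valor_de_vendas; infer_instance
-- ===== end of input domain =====

-- B replaces A's sort + stateful sentinel scan by two filters with min/max per sublist (simpler, no sort).


-- ===== PORT A =====
-- the inner-loop body of A: updates (menorvalor, maiorvalor) with one item
def pvStepA (s : Int × Int) (item : Int) : Int × Int :=
  let menorvalor := if 20 ≤ item ∧ s.1 = 0 then item else s.1
  let maiorvalor := if 20 ≤ item ∧ item ≤ 500 ∧ s.2 < item then item else s.2
  (menorvalor, maiorvalor)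

-- A's body for one sublist i: sort, scan with the two sentinels, both-zero check
def pvInnerA (i : List Int) : List Int :=
  let listaordem := PySem.List.sorted i (fun x => x) false
  let st := listaordem.foldl pvStepA (0, 0)
  if st.1 = 0 ∧ st.2 = 0 then [] else [st.1, st.2]

def retorna_menor_e_maior_valor_de_vendas (ticket : List (List Int)) : List (List Int) :=
  ticket.foldl (fun novalista i => novalista ++ [pvInnerA i]) []

-- ===== PORT B =====
-- B's body for one sublist: filter for >= 20, then min / max of the filtered lists
def pvInnerB (i : List Int) : List Int :=
  let ge := i.filter (fun x => decide (20 ≤ x))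
  if ge = [] then []
  else
    let inr := ge.filter (fun x => decide (x ≤ 500))
    [(PySem.List.min? ge (fun x => x)).getD 0, (PySem.List.max? inr (fun x => x)).getD 0]

def retorna_menor_e_maior_valor_de_vendas_alt (ticket : List (List Int)) : List (List Int) :=
  ticket.map pvInnerB

-- ===== PRECONDITION & SPEC =====
def Spec_retorna_menor_e_maior_valor_de_vendas (ticket : List (List Int)) (out : List (List Int)) : Prop := out = retorna_menor_e_maior_valor_de_vendas_alt ticket
instance (ticket : List (List Int)) (out : List (List Int)) : Decidable (Spec_retorna_menor_e_maior_valor_de_vendas ticket out) := by unfold Spec_retorna_menor_e_maior_valor_de_vendas; infer_instance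

-- ===== CLAIM (what is proved, stated in full; the proofs are below) =====
def Claim_equal_retorna_menor_e_maior_valor_de_vendas : Prop := ∀ (ticket : List (List Int)), Dom_retorna_menor_e_maior_valor_de_vendas ticket → Spec_retorna_menor_e_maior_valor_de_vendas ticket (retorna_menor_e_maior_valor_de_vendas ticket)

-- ===== LEMMAS AND PROOFS =====
def pvF1 (m x : Int) : Int := if 20 ≤ x ∧ m = 0 then x else m
def pvF2 (M x : Int) : Int := if 20 ≤ x ∧ x ≤ 500 ∧ M < x then x else M

theorem pv_fold_split (l : List Int) (a b : Int) :
    l.foldl pvStepA (a, b) = (l.foldl pvF1 a, l.foldl pvF2 b) := by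
  induction l generalizing a b with
  | nil => rfl
  | cons x t ih => simpa [pvStepA, pvF1, pvF2] using ih _ _

theorem pvF1_stay (l : List Int) (m : Int) (hm : m ≠ 0) : l.foldl pvF1 m = m := by
  induction l with
  | nil => rfl
  | cons x t ih => simp [pvF1, hm, ih]

theorem pvF1_eq (l : List Int) :
    l.foldl pvF1 0 = ((l.filter (fun x => decide (20 ≤ x))).head?).getD 0 := by
  induction l with
  | nil => rfl
  | cons x t ih =>
    by_cases h : 20 ≤ x
    · have hx : x ≠ 0 := by omega
      simp [pvF1, h, pvF1_stay t x hx]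
    · simp [pvF1, h, ih]

theorem pvF2_eq_max (l : List Int) (M : Int) :
    l.foldl pvF2 M = (l.filter (fun x => decide (20 ≤ x) && decide (x ≤ 500))).foldl max M := by
  induction l generalizing M with
  | nil => rfl
  | cons x t ih =>
    by_cases h : 20 ≤ x ∧ x ≤ 500
    · have : pvF2 M x = max M x := by
        simp only [pvF2]
        by_cases h' : x ≤ M
        · simp [h, not_lt.mpr h', max_eq_left h']
        · simp [h, lt_of_not_ge h', max_eq_right (le_of_not_ge h')]
      simp [h, this, ih]
    · have : pvF2 M x = M := by
        simp only [pvF2]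
        split_ifs with hh
        · exact absurd ⟨hh.1, hh.2.1⟩ h
        · rfl
      simp [h, this, ih]

theorem pv_foldl_max_perm {l l' : List Int} (h : l.Perm l') (a : Int) :
    l.foldl max a = l'.foldl max a := by
  induction h generalizing a with
  | nil => rfl
  | cons x _ ih => simp [ih]
  | swap x y => simp [max_comm, max_left_comm]
  | trans _ _ ih1 ih2 => exact (ih1 a).trans (ih2 a)

theorem pv_filter_eq (i : List Int) :
    i.filter (fun x => decide (20 ≤ x) && decide (x ≤ 500)) =
      (i.filter (fun x => decide (20 ≤ x))).filter (fun x => decide (x ≤ 500)) := by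
  rw [List.filter_filter]
  exact List.filter_congr (fun x _ => Bool.and_comm _ _)

theorem pv_maior_eq (i : List Int) :
    ((PySem.List.sorted i (fun x => x) false).filter (fun x => decide (20 ≤ x) && decide (x ≤ 500))).foldl max 0 =
      (PySem.List.max? ((i.filter (fun x => decide (20 ≤ x))).filter (fun x => decide (x ≤ 500))) (fun x => x)).getD 0 := by
  have hperm : ((PySem.List.sorted i (fun x => x) false).filter (fun x => decide (20 ≤ x) && decide (x ≤ 500))).Perm
      (i.filter (fun x => decide (20 ≤ x) && decide (x ≤ 500))) :=
    (PySem.List.sorted_perm (xs := i) (key := fun x => x) (rev := false)).filter _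
  rw [pv_foldl_max_perm hperm, pv_filter_eq]
  cases hir : (i.filter (fun x => decide (20 ≤ x))).filter (fun x => decide (x ≤ 500)) with
  | nil => rfl
  | cons y t =>
    have hy : (20:Int) ≤ y := by
      have hmem : y ∈ (i.filter (fun x => decide (20 ≤ x))).filter (fun x => decide (x ≤ 500)) :=
        hir ▸ List.mem_cons_self (l := t)
      have := List.of_mem_filter (List.mem_of_mem_filter hmem)
      simpa using this
    rw [PySem.List.max?_id_cons]
    have h0y : max (0:Int) y = y := max_eq_right (by omega)
    simp [h0y]

theorem pv_inner_eq (i : List Int) : pvInnerA i = pvInnerB i := by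
  have hperm : (PySem.List.sorted i (fun x => x) false).Perm i :=
    PySem.List.sorted_perm (xs := i) (key := fun x => x) (rev := false)
  have hp2 : ((PySem.List.sorted i (fun x => x) false).filter (fun x => decide (20 ≤ x))).Perm
      (i.filter (fun x => decide (20 ≤ x))) := hperm.filter _
  unfold pvInnerA pvInnerB
  simp only [pv_fold_split, pvF1_eq, pvF2_eq_max]
  by_cases hge : i.filter (fun x => decide (20 ≤ x)) = []
  · have hfs : (PySem.List.sorted i (fun x => x) false).filter (fun x => decide (20 ≤ x)) = [] :=
      (hge ▸ hp2).eq_nil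
    have hfP : (PySem.List.sorted i (fun x => x) false).filter (fun x => decide (20 ≤ x) && decide (x ≤ 500)) = [] := by
      rw [List.filter_eq_nil_iff] at hfs ⊢
      intro x hx hc
      exact hfs x hx (by simp at hc ⊢; exact hc.1)
    simp [hge, hfs, hfP]
  · have hfs : (PySem.List.sorted i (fun x => x) false).filter (fun x => decide (20 ≤ x)) ≠ [] := by
      intro h; exact hge (h ▸ hp2).symm.eq_nil
    obtain ⟨h, t, hfst⟩ := List.exists_cons_of_ne_nil hfs
    have hh20 : (20:Int) ≤ h := by
      have hmem : h ∈ (PySem.List.sorted i (fun x => x) false).filter (fun x => decide (20 ≤ x)) :=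
        hfst ▸ List.mem_cons_self (l := t)
      have := List.of_mem_filter hmem
      simpa using this
    obtain ⟨mn, hmn⟩ : ∃ mn, PySem.List.min? (i.filter (fun x => decide (20 ≤ x))) (fun x => x) = some mn := by
      cases hm : PySem.List.min? (i.filter (fun x => decide (20 ≤ x))) (fun x => x) with
      | none => exact absurd ((PySem.List.min?_eq_none_iff _ _).mp hm) hge
      | some v => exact ⟨v, rfl⟩
    have hmn_eq : mn = h := by
      have hhge : h ∈ i.filter (fun x => decide (20 ≤ x)) :=
        hp2.subset (hfst ▸ List.mem_cons_self (l := t))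
      have h1 : mn ≤ h := by simpa using PySem.List.min?_isMin hmn h hhge
      have hmem : mn ∈ (PySem.List.sorted i (fun x => x) false).filter (fun x => decide (20 ≤ x)) :=
        hp2.symm.subset (PySem.List.min?_mem hmn)
      have hpw : ((PySem.List.sorted i (fun x => x) false).filter (fun x => decide (20 ≤ x))).Pairwise
          (fun a b => a ≤ b) := by
        have := PySem.List.sorted_pairwise (xs := i) (key := fun x => x)
        exact this.sublist List.filter_sublist
      rw [hfst] at hmem hpw
      have h2 : h ≤ mn := by
        rcases List.mem_cons.mp hmem with rfl | hmem'
        · exact le_refl _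
        · exact (List.pairwise_cons.mp hpw).1 mn hmem'
      omega
    have hne : ¬ (h = 0 ∧ ((PySem.List.sorted i (fun x => x) false).filter
        (fun x => decide (20 ≤ x) && decide (x ≤ 500))).foldl max 0 = 0) := by
      rintro ⟨h0, -⟩; omega
    rw [hfst]
    simp only [List.head?_cons, Option.getD_some, hmn, hmn_eq, if_neg hge]
    rw [if_neg hne, pv_maior_eq i]

theorem pv_outer (ticket : List (List Int)) (acc : List (List Int)) :
    ticket.foldl (fun novalista i => novalista ++ [pvInnerA i]) acc = acc ++ ticket.map pvInnerA := by
  induction ticket generalizing acc with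
  | nil => simp
  | cons x t ih => simp [ih]

-- ===== VERDICT (by name: the statement is the Claim_ definition above) =====
theorem retorna_menor_e_maior_valor_de_vendas_spec : Claim_equal_retorna_menor_e_maior_valor_de_vendas := by
  intro ticket _
  show retorna_menor_e_maior_valor_de_vendas ticket = retorna_menor_e_maior_valor_de_vendas_alt ticket
  unfold retorna_menor_e_maior_valor_de_vendas retorna_menor_e_maior_valor_de_vendas_alt
  rw [pv_outer, List.nil_append]
  exact List.map_congr_left (fun i _ => pv_inner_eq i)
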